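-- pv_equiv track=rewrite | github.com/clara-aguayo/Synera_barcodev1 | only_generation_of_vouchers.py | formatear_monto
-- ===== SOURCE A (Python) =====
-- def formatear_monto(valor):
--     """Limpia y deja el monto en formato: 75.000 Gs"""
--     monto_raw = str(valor).strip()
--     monto_limpio = monto_raw.replace(".", "").replace(",", "").replace(" ", "")
--     monto_digits = "".join(c for c in monto_limpio if c.isdigit())
--     if monto_digits == "":
--         monto_digits = "0"
--     monto_int = int(monto_digits)
--     monto_formateado = f"{monto_int:,}".replace(",", ".")
--     return f"{monto_formateado} Gs"
-- ===== SOURCE B (Python) =====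
-- def formatear_monto(valor):
--     """Limpia y deja el monto en formato: 75.000 Gs"""
--     # one pass keeps the digits (cleaning already removes only non-digits)
--     digits = ''.join(filter(str.isdigit, str(valor)))
--     # normalize like int() would: drop leading zeros, empty -> '0'
--     i = 0
--     while i < len(digits) and digits[i] == '0':
--         i += 1
--     digits = digits[i:]
--     if not digits:
--         digits = '0'
--     # group in threes from the right, joined with '.'
--     parts = []
--     while len(digits) > 3:
--         parts.append(digits[-3:])
--         digits = digits[:-3]
--     parts.append(digits)
--     return '.'.join(reversed(parts)) + ' Gs'
-- ===== Notes on version B (the rewrite author's own statement) =====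
-- stated objective: alternative
-- what changed: B replaces A's strip-plus-three-replace cleaning, int() conversion and comma-format-spec rendering by a single digit-filter pass, an explicit leading-zero strip, and a manual right-to-left three-digit grouping loop joined with dot separators.
import Mathlib
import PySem

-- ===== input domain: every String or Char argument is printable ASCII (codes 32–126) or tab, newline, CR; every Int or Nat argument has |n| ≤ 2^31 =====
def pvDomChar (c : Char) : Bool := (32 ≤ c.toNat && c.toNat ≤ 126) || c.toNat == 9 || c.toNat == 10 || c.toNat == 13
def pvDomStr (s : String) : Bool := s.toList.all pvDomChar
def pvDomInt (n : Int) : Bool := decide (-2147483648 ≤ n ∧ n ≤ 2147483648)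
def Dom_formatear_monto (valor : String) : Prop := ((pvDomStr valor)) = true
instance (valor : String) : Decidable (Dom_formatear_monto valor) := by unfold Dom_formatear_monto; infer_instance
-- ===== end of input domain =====

-- B cleans with one digit-filter pass and formats by an explicit right-to-left grouping pass instead of strip+replaces, int() and comma-format rendering; objective: alternative decomposition.

-- ===== PORT A =====
-- int() hand-ported: on the nonempty all-digit strings monto_digits always is,
-- Python's int(s) is exactly this base-10 left fold (exact on that domain).
def pvIntOfDigits (ds : List Char) : Int :=
  ds.foldl (fun a c => 10 * a + ((c.toNat : Int) - 48)) 0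

-- f"{n:,}" hand-ported for the nonnegative n this code always produces:
-- a ',' before every group of three digits counted from the right (exact there).
def pvCommify (ds : List Char) : List Char :=
  if _h : ds.length ≤ 3 then ds
  else pvCommify (ds.take (ds.length - 3)) ++ ',' :: ds.drop (ds.length - 3)
termination_by ds.length
decreasing_by simp_all [List.length_take]; omega

def formatear_monto (valor : String) : String :=
  -- monto_raw = str(valor).strip()
  let monto_raw := PySem.Chars.strip valor.toList
  -- monto_limpio = monto_raw.replace(".", "").replace(",", "").replace(" ", "")
  let monto_limpio :=
    PySem.Chars.replace (PySem.Chars.replace (PySem.Chars.replace monto_raw ['.'] []) [','] []) [' '] []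
  -- monto_digits = "".join(c for c in monto_limpio if c.isdigit())
  let monto_digits := monto_limpio.foldl (fun acc c => if PySem.Chars.isdigit c then acc ++ [c] else acc) []
  -- if monto_digits == "": monto_digits = "0"
  let monto_digits := if monto_digits = [] then ['0'] else monto_digits
  -- monto_int = int(monto_digits)
  let monto_int : Int := pvIntOfDigits monto_digits
  -- monto_formateado = f"{monto_int:,}".replace(",", ".")
  let monto_formateado := PySem.Chars.replace (pvCommify (PySem.Int.toChars monto_int)) [','] ['.']
  -- return f"{monto_formateado} Gs"
  String.ofList (monto_formateado ++ [' ', 'G', 's'])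

-- ===== PORT B =====
-- while len(digits) > 3: parts.append(digits[-3:]); digits = digits[:-3]  /  parts.append(digits)
def pvAltGroup (ds : List Char) (parts : List (List Char)) : List (List Char) :=
  if _h : 3 < ds.length then
    pvAltGroup (PySem.List.slice ds none (some (-3))) (parts ++ [PySem.List.slice ds (some (-3)) none])
  else parts ++ [ds]
termination_by ds.length
decreasing_by simp_all [PySem.List.slice, PySem.List.clampIdx]; split_ifs at * <;> omega

def formatear_monto_alt (valor : String) : String :=
  -- digits = ''.join(filter(str.isdigit, str(valor)))
  let digits := valor.toList.filter PySem.Chars.isdigit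
  -- the leading-zero while loop + slice
  let digits := digits.dropWhile (fun c => c == '0')
  -- if not digits: digits = '0'
  let digits := if digits = [] then ['0'] else digits
  -- '.'.join(reversed(parts)) + ' Gs'
  String.ofList (PySem.Chars.join ['.'] ((pvAltGroup digits []).reverse) ++ [' ', 'G', 's'])

-- ===== PRECONDITION & SPEC =====
def Spec_formatear_monto (valor : String) (out : String) : Prop := out = formatear_monto_alt valor
instance (valor : String) (out : String) : Decidable (Spec_formatear_monto valor out) := by unfold Spec_formatear_monto; infer_instance

-- ===== CLAIM (what is proved, stated in full; the proofs are below) =====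
def Claim_equal_formatear_monto : Prop := ∀ (valor : String), Dom_formatear_monto valor → Spec_formatear_monto valor (formatear_monto valor)

-- ===== LEMMAS AND PROOFS =====

-- the canonical decimal digit string, recursion on n/10 (proof-side mirror of Nat.toDigits)
def pvRep (n : Nat) : List Char :=
  if _h : n < 10 then [Nat.digitChar n]
  else pvRep (n / 10) ++ [Nat.digitChar (n % 10)]
termination_by n
decreasing_by omega

-- the '.'-grouping both sides compute (proof-side)
def pvDotify (ds : List Char) : List Char :=
  if _h : ds.length ≤ 3 then ds
  else pvDotify (ds.take (ds.length - 3)) ++ '.' :: ds.drop (ds.length - 3)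
termination_by ds.length
decreasing_by simp_all [List.length_take]; omega

def pvValNat (ds : List Char) : Nat :=
  ds.foldl (fun a c => 10 * a + (c.toNat - 48)) 0

theorem pvRep_small (n : Nat) (h : n < 10) : pvRep n = [Nat.digitChar n] := by
  rw [pvRep]; simp [h]

theorem pvRep_large (n : Nat) (h : ¬ n < 10) : pvRep n = pvRep (n / 10) ++ [Nat.digitChar (n % 10)] := by
  rw [pvRep]; simp [h]

-- single-char replace is a flatMap
theorem pv_replace_go (o : Char) (new : List Char) :
    ∀ (fuel : Nat) (l acc : List Char), l.length ≤ fuel →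
      PySem.Chars.replace.go [o] new fuel l acc
        = acc.reverse ++ l.flatMap (fun c => if c = o then new else [c]) := by
  intro fuel
  induction fuel with
  | zero =>
    intro l acc h
    have hl : l = [] := by cases l <;> simp_all
    subst hl
    rw [PySem.Chars.replace.go]
    simp
  | succ f ih =>
    intro l acc h
    cases l with
    | nil => rw [PySem.Chars.replace.go]; simp; omega
    | cons c t =>
      rw [PySem.Chars.replace.go]
      by_cases hc : c = o
      · subst hc
        have hp : [c].isPrefixOf (c :: t) = true := by simp [List.isPrefixOf]
        rw [if_pos hp, ih _ _ (by simpa using h)]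
        simp
      · have hp : [o].isPrefixOf (c :: t) = false := by
          simp [List.isPrefixOf]; exact fun h' => (hc h'.symm).elim
        rw [if_neg (by simp [hp]), ih _ _ (by simpa using Nat.le_of_succ_le_succ h)]
        simp [hc]

theorem pv_replace_single (l : List Char) (o : Char) (new : List Char) :
    PySem.Chars.replace l [o] new = l.flatMap (fun c => if c = o then new else [c]) := by
  rw [PySem.Chars.replace]
  simp only [List.isEmpty_cons, Bool.false_eq_true, if_false]
  exact pv_replace_go o new l.length l [] (le_refl _)

theorem pv_flatMap_id (l : List Char) (o : Char) (new : List Char) (h : ∀ c ∈ l, c ≠ o) :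
    l.flatMap (fun c => if c = o then new else [c]) = l := by
  induction l with
  | nil => rfl
  | cons c t ih =>
    simp only [List.flatMap_cons, if_neg (h c (by simp))]
    simp [ih (fun c hc => h c (by simp [hc]))]

theorem pv_filter_flatMap_rm (p : Char → Bool) (o : Char) (hp : p o = false) (l : List Char) :
    (l.flatMap (fun c => if c = o then ([] : List Char) else [c])).filter p = l.filter p := by
  induction l with
  | nil => rfl
  | cons c t ih =>
    by_cases hc : c = o
    · subst hc; simp [List.flatMap_cons, ih, List.filter_cons, hp]
    · simp [List.flatMap_cons, if_neg hc, List.filter_cons, ih]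

theorem pv_filter_dropWhile (p q : Char → Bool) (h : ∀ c, q c = true → p c = false) (l : List Char) :
    (l.dropWhile q).filter p = l.filter p := by
  induction l with
  | nil => rfl
  | cons c t ih =>
    by_cases hc : q c = true
    · simp [List.dropWhile_cons, hc, ih, List.filter_cons, h c hc]
    · simp [List.dropWhile_cons, hc]

theorem pv_isspace_not_digit (c : Char) (h : PySem.Chars.isspace c = true) :
    PySem.Chars.isdigit c = false := by
  simp only [PySem.Chars.isspace] at h
  simp only [Char.toNat, Bool.or_eq_true, Bool.and_eq_true, decide_eq_true_eq] at h
  simp only [PySem.Chars.isdigit, Char.le_def,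
    UInt32.le_iff_toNat_le, Bool.and_eq_false_iff, decide_eq_false_iff_not, not_le]
  have h0 : ('0').val.toNat = 48 := by decide
  have h9 : ('9').val.toNat = 57 := by decide
  omega

-- the generator-expression fold is a filter
theorem pv_fold_filter (l : List Char) :
    l.foldl (fun acc c => if PySem.Chars.isdigit c then acc ++ [c] else acc) []
      = l.filter PySem.Chars.isdigit := by
  simpa using PySem.List.foldl_append_if_eq_filter PySem.Chars.isdigit l []

-- cleaning does not change the kept digits
theorem pv_digits_clean (s : List Char) :
    (PySem.Chars.replace (PySem.Chars.replace (PySem.Chars.replace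
        (PySem.Chars.strip s) ['.'] []) [','] []) [' '] []).filter PySem.Chars.isdigit
      = s.filter PySem.Chars.isdigit := by
  rw [pv_replace_single, pv_replace_single, pv_replace_single]
  rw [pv_filter_flatMap_rm _ _ (by decide), pv_filter_flatMap_rm _ _ (by decide),
    pv_filter_flatMap_rm _ _ (by decide)]
  rw [PySem.Chars.strip, PySem.Chars.rstrip, PySem.Chars.lstrip]
  rw [List.filter_reverse, pv_filter_dropWhile _ _ pv_isspace_not_digit,
    List.filter_reverse, List.reverse_reverse, pv_filter_dropWhile _ _ pv_isspace_not_digit]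

-- ### parse / print round trip ###

theorem pv_digit_bounds (c : Char) (h : PySem.Chars.isdigit c = true) :
    48 ≤ c.toNat ∧ c.toNat ≤ 57 := by
  simp only [PySem.Chars.isdigit, Bool.and_eq_true, decide_eq_true_eq, Char.le_def,
    UInt32.le_iff_toNat_le] at h
  have h0 : ('0').val.toNat = 48 := by decide
  have h9 : ('9').val.toNat = 57 := by decide
  have hval : c.toNat = c.val.toNat := rfl
  omega

theorem pv_char_eq_of_toNat (c d : Char) (h : c.toNat = d.toNat) : c = d :=
  Char.ext (UInt32.toNat_inj.mp h)

theorem pv_toDigitsCore (f : Nat) : ∀ (n : Nat) (ds : List Char), n < 10 ^ (f + 1) →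
    Nat.toDigitsCore 10 (f + 1) n ds = pvRep n ++ ds := by
  induction f with
  | zero =>
    intro n ds h
    rw [Nat.toDigitsCore]
    have h10 : n < 10 := by simpa using h
    have hdiv : n / 10 = 0 := Nat.div_eq_of_lt h10
    have hmod : n % 10 = n := Nat.mod_eq_of_lt h10
    rw [pvRep_small n h10]
    simp [hdiv, hmod]
  | succ f ih =>
    intro n ds h
    rw [Nat.toDigitsCore]
    by_cases hdiv : n / 10 = 0
    · have h10 : n < 10 := by omega
      have hmod : n % 10 = n := Nat.mod_eq_of_lt h10
      rw [pvRep_small n h10]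
      simp [hdiv, hmod]
    · simp only [hdiv, if_false]
      rw [ih (n / 10) _ (by
        have : n < 10 * 10 ^ (f + 1) := by
          calc n < 10 ^ (f + 1 + 1) := h
          _ = 10 * 10 ^ (f + 1) := by ring
        omega)]
      have h10 : ¬ n < 10 := by omega
      rw [pvRep_large n h10]
      simp

theorem pv_toDigits (n : Nat) : Nat.toDigits 10 n = pvRep n := by
  rw [Nat.toDigits]
  have hlt : n < 10 ^ (n + 1) := by
    calc n < 2 ^ n := Nat.lt_two_pow_self
    _ ≤ 10 ^ n := Nat.pow_le_pow_left (by omega) n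
    _ ≤ 10 ^ (n + 1) := Nat.pow_le_pow_right (by omega) (by omega)
  simpa using pv_toDigitsCore n n [] hlt

theorem pv_digitChar (c : Char) (h : PySem.Chars.isdigit c = true) :
    Nat.digitChar (c.toNat - 48) = c := by
  simp only [PySem.Chars.isdigit, Bool.and_eq_true, decide_eq_true_eq, Char.le_def,
    UInt32.le_iff_toNat_le] at h
  have h0 : ('0').val.toNat = 48 := by decide
  have h9 : ('9').val.toNat = 57 := by decide
  have hval : c.toNat = c.val.toNat := rfl
  have hlo : 48 ≤ c.toNat := by omega
  have hhi : c.toNat ≤ 57 := by omega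
  apply Char.ext
  apply UInt32.toNat_inj.mp
  interval_cases h' : c.toNat <;> (rw [← hval]; decide)

theorem pv_val_append (e : List Char) (c : Char) :
    pvValNat (e ++ [c]) = 10 * pvValNat e + (c.toNat - 48) := by
  simp [pvValNat, List.foldl_append]

theorem pv_foldl_ge (t : List Char) : ∀ (a : Nat),
    a ≤ t.foldl (fun a c => 10 * a + (c.toNat - 48)) a := by
  induction t with
  | nil => intro a; simp
  | cons c t ih =>
    intro a
    simp only [List.foldl_cons]
    exact le_trans (by omega) (ih (10 * a + (c.toNat - 48)))

theorem pv_val_pos (d : List Char) (hdig : ∀ c ∈ d, PySem.Chars.isdigit c = true)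
    (hhd : d.head? ≠ some '0') : d ≠ [] → 1 ≤ pvValNat d := by
  intro hne
  cases d with
  | nil => exact (hne rfl).elim
  | cons c t =>
    have hb := pv_digit_bounds c (hdig c (by simp))
    have hc0 : c ≠ '0' := by
      intro h; subst h; exact hhd rfl
    have hc48 : c.toNat ≠ 48 := by
      intro h
      exact hc0 (pv_char_eq_of_toNat c '0' (by rw [h]; decide))
    have h1 : 1 ≤ c.toNat - 48 := by omega
    have h2 := pv_foldl_ge t (c.toNat - 48)
    have heq : pvValNat (c :: t) = t.foldl (fun a c => 10 * a + (c.toNat - 48)) (c.toNat - 48) := by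
      simp [pvValNat]
    omega

theorem pv_val_dropZeros (d : List Char) :
    pvValNat (d.dropWhile (fun c => c == '0')) = pvValNat d := by
  induction d with
  | nil => rfl
  | cons c t ih =>
    by_cases hc : c = '0'
    · subst hc; simpa [List.dropWhile_cons, pvValNat] using ih
    · simp [List.dropWhile_cons, hc]

theorem pv_rep_val (d : List Char) : d ≠ [] → (∀ c ∈ d, PySem.Chars.isdigit c = true) →
    d.head? ≠ some '0' → pvRep (pvValNat d) = d := by
  induction d using List.reverseRecOn with
  | nil => intro h; exact (h rfl).elim
  | append_singleton e c ih =>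
    intro _ hdig hhd
    rw [pv_val_append]
    have hbc := pv_digit_bounds c (hdig c (by simp))
    have hv : c.toNat - 48 < 10 := by omega
    by_cases he : e = []
    · subst he
      have h0 : pvValNat ([] : List Char) = 0 := rfl
      rw [h0]
      simp only [Nat.mul_zero, Nat.zero_add]
      rw [pvRep_small _ hv, pv_digitChar c (hdig c (by simp))]
      simp
    · have hdige : ∀ x ∈ e, PySem.Chars.isdigit x = true := fun x hx => hdig x (by simp [hx])
      have hhde : e.head? ≠ some '0' := by
        rw [List.head?_append] at hhd
        cases hh : e.head? with
        | none => exact (he (List.head?_eq_none_iff.mp hh)).elim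
        | some a =>
          rw [hh] at hhd
          simpa using hhd
      have h1 : 1 ≤ pvValNat e := pv_val_pos e hdige hhde he
      rw [pvRep_large _ (by omega)]
      have hd10 : (10 * pvValNat e + (c.toNat - 48)) / 10 = pvValNat e := by
        rw [Nat.mul_add_div (by omega)]
        simp [Nat.div_eq_of_lt hv]
      have hm10 : (10 * pvValNat e + (c.toNat - 48)) % 10 = c.toNat - 48 := by
        rw [Nat.mul_add_mod]
        exact Nat.mod_eq_of_lt hv
      rw [hd10, hm10, ih he hdige hhde, pv_digitChar c (hdig c (by simp))]

-- main round trip: parse then print = strip leading zeros (with '0' fallback)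
theorem pv_roundtrip (d : List Char) (hdig : ∀ c ∈ d, PySem.Chars.isdigit c = true) :
    Nat.toDigits 10 (pvValNat (if d = [] then ['0'] else d))
      = (if d.dropWhile (fun c => c == '0') = [] then ['0'] else d.dropWhile (fun c => c == '0')) := by
  by_cases hd : d = []
  · subst hd
    simp only [List.dropWhile_nil, reduceIte]
    rw [pv_toDigits]
    have h0 : pvValNat ['0'] = 0 := by decide
    rw [h0, pvRep_small 0 (by omega)]
    rfl
  · rw [if_neg hd, pv_toDigits]
    by_cases hsd : d.dropWhile (fun c => c == '0') = []
    · rw [if_pos hsd]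
      have hv0 : pvValNat d = 0 := by
        rw [← pv_val_dropZeros, hsd]; rfl
      rw [hv0, pvRep_small 0 (by omega)]
      rfl
    · rw [if_neg hsd]
      rw [← pv_val_dropZeros]
      apply pv_rep_val _ hsd
      · intro c hc
        exact hdig c ((List.dropWhile_sublist _).subset hc)
      · have hnot := List.head?_dropWhile_not (fun c => c == '0') d
        cases hh : (d.dropWhile (fun c => c == '0')).head? with
        | none => exact (hsd (List.head?_eq_none_iff.mp hh)).elim
        | some a =>
          rw [hh] at hnot
          simp only [ne_eq, Option.some.injEq]
          intro ha
          subst ha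
          simp at hnot

theorem pv_intOfDigits_cast (d : List Char) (hdig : ∀ c ∈ d, PySem.Chars.isdigit c = true) :
    pvIntOfDigits d = (pvValNat d : Int) := by
  have gen : ∀ (l : List Char), (∀ c ∈ l, PySem.Chars.isdigit c = true) → ∀ (a : Nat),
      l.foldl (fun a c => 10 * a + ((c.toNat : Int) - 48)) (a : Int)
        = ((l.foldl (fun a c => 10 * a + (c.toNat - 48)) a : Nat) : Int) := by
    intro l
    induction l with
    | nil => intro _ a; rfl
    | cons c t ih =>
      intro hdig' a
      have hb := pv_digit_bounds c (hdig' c (by simp))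
      simp only [List.foldl_cons]
      have : (10 * (a : Int) + ((c.toNat : Int) - 48)) = ((10 * a + (c.toNat - 48) : Nat) : Int) := by
        push_cast [Nat.cast_sub (by omega : 48 ≤ c.toNat)]
        ring
      rw [this, ih (fun x hx => hdig' x (by simp [hx]))]
  simpa using gen d hdig 0

theorem pv_toChars_nat (m : Nat) : PySem.Int.toChars (m : Int) = Nat.toDigits 10 m := by
  simp [PySem.Int.toChars]

-- ### grouping ###

theorem pvCommify_small (ds : List Char) (h : ds.length ≤ 3) : pvCommify ds = ds := by
  rw [pvCommify]; simp [h]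

theorem pvCommify_large (ds : List Char) (h : ¬ ds.length ≤ 3) :
    pvCommify ds = pvCommify (ds.take (ds.length - 3)) ++ ',' :: ds.drop (ds.length - 3) := by
  rw [pvCommify]; simp [h]

theorem pvDotify_small (ds : List Char) (h : ds.length ≤ 3) : pvDotify ds = ds := by
  rw [pvDotify]; simp [h]

theorem pvDotify_large (ds : List Char) (h : ¬ ds.length ≤ 3) :
    pvDotify ds = pvDotify (ds.take (ds.length - 3)) ++ '.' :: ds.drop (ds.length - 3) := by
  rw [pvDotify]; simp [h]

theorem pv_slice_front (ds : List Char) (h : 3 < ds.length) :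
    PySem.List.slice ds none (some (-3)) = ds.take (ds.length - 3) := by
  simp only [PySem.List.slice, PySem.List.clampIdx]
  split_ifs with h1 h2 <;> try omega
  simp
  congr 1
  omega

theorem pv_slice_back (ds : List Char) (h : 3 < ds.length) :
    PySem.List.slice ds (some (-3)) none = ds.drop (ds.length - 3) := by
  simp only [PySem.List.slice, PySem.List.clampIdx]
  split_ifs with h1 h2 <;> try omega
  have e1 : ((ds.length : Int) + -3).toNat = ds.length - 3 := by omega
  rw [e1]
  apply List.take_of_length_le
  simp

theorem pv_commify_map_aux (n : Nat) : ∀ (ds : List Char), ds.length ≤ n → (∀ c ∈ ds, c ≠ ',') →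
    (pvCommify ds).flatMap (fun c => if c = ',' then ['.'] else [c]) = pvDotify ds := by
  induction n with
  | zero =>
    intro ds hn h
    have : ds = [] := List.length_eq_zero_iff.mp (by omega)
    subst this
    simp [pvCommify_small, pvDotify_small]
  | succ n ih =>
    intro ds hn h
    by_cases h3 : ds.length ≤ 3
    · rw [pvCommify_small ds h3, pvDotify_small ds h3]
      exact pv_flatMap_id ds ',' ['.'] h
    · rw [pvCommify_large ds h3, pvDotify_large ds h3, List.flatMap_append]
      rw [ih (ds.take (ds.length - 3)) (by simp; omega)
        (fun c hc => h c (List.take_subset _ _ hc))]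
      simp only [List.flatMap_cons, if_pos rfl]
      rw [pv_flatMap_id (ds.drop (ds.length - 3)) ',' ['.']
        (fun c hc => h c (List.drop_subset _ _ hc))]
      simp

theorem pv_commify_map (ds : List Char) (h : ∀ c ∈ ds, c ≠ ',') :
    (pvCommify ds).flatMap (fun c => if c = ',' then ['.'] else [c]) = pvDotify ds :=
  pv_commify_map_aux ds.length ds (le_refl _) h

theorem pvAltGroup_small (ds : List Char) (parts : List (List Char)) (h : ¬ 3 < ds.length) :
    pvAltGroup ds parts = parts ++ [ds] := by
  rw [pvAltGroup]; simp [h]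

theorem pvAltGroup_large (ds : List Char) (parts : List (List Char)) (h : 3 < ds.length) :
    pvAltGroup ds parts
      = pvAltGroup (ds.take (ds.length - 3)) (parts ++ [ds.drop (ds.length - 3)]) := by
  rw [pvAltGroup]
  simp only [h, dif_pos]
  rw [pv_slice_front ds h, pv_slice_back ds h]

theorem pv_altGroup_parts_aux (n : Nat) : ∀ (ds : List Char), ds.length ≤ n →
    ∀ (parts : List (List Char)), pvAltGroup ds parts = parts ++ pvAltGroup ds [] := by
  induction n with
  | zero =>
    intro ds hn parts
    have h3 : ¬ 3 < ds.length := by omega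
    rw [pvAltGroup_small ds parts h3, pvAltGroup_small ds [] h3]
    simp
  | succ n ih =>
    intro ds hn parts
    by_cases h3 : 3 < ds.length
    · rw [pvAltGroup_large ds parts h3, pvAltGroup_large ds [] h3]
      rw [ih (ds.take (ds.length - 3)) (by simp; omega)]
      rw [ih (ds.take (ds.length - 3)) (by simp; omega) ([] ++ [ds.drop (ds.length - 3)])]
      simp
    · rw [pvAltGroup_small ds parts h3, pvAltGroup_small ds [] h3]
      simp

theorem pv_altGroup_parts (ds : List Char) : ∀ (parts : List (List Char)),
    pvAltGroup ds parts = parts ++ pvAltGroup ds [] :=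
  pv_altGroup_parts_aux ds.length ds (le_refl _)

theorem pv_altGroup_ne (ds : List Char) (parts : List (List Char)) :
    pvAltGroup ds parts ≠ [] := by
  by_cases h3 : 3 < ds.length
  · rw [pv_altGroup_parts ds parts]
    rw [pvAltGroup_large ds [] h3, pv_altGroup_parts]
    simp
  · rw [pvAltGroup_small ds parts h3]
    simp

theorem pv_join_concat (y : List Char) : ∀ (xs : List (List Char)), xs ≠ [] →
    PySem.Chars.join ['.'] (xs ++ [y]) = PySem.Chars.join ['.'] xs ++ '.' :: y := by
  intro xs
  induction xs with
  | nil => exact fun h => (h rfl).elim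
  | cons a t ih =>
    intro _
    cases t with
    | nil => simp [PySem.Chars.join, List.intercalate]
    | cons b t' =>
      have h1 : PySem.Chars.join ['.'] ((a :: b :: t') ++ [y])
          = a ++ '.' :: PySem.Chars.join ['.'] ((b :: t') ++ [y]) := by
        simp [PySem.Chars.join, List.intercalate]
      have h2 : PySem.Chars.join ['.'] (a :: b :: t')
          = a ++ '.' :: PySem.Chars.join ['.'] (b :: t') := by
        simp [PySem.Chars.join, List.intercalate]
      rw [h1, h2, ih (by simp)]
      simp

theorem pv_join_altGroup_aux (n : Nat) : ∀ (ds : List Char), ds.length ≤ n →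
    PySem.Chars.join ['.'] ((pvAltGroup ds []).reverse) = pvDotify ds := by
  induction n with
  | zero =>
    intro ds hn
    have h3 : ¬ 3 < ds.length := by omega
    rw [pvAltGroup_small ds [] h3, pvDotify_small ds (by omega)]
    simp [PySem.Chars.join, List.intercalate]
  | succ n ih =>
    intro ds hn
    by_cases h3 : 3 < ds.length
    · rw [pvAltGroup_large ds [] h3, pv_altGroup_parts]
      rw [List.reverse_append]
      simp only [List.nil_append, List.reverse_cons, List.reverse_nil]
      rw [pv_join_concat _ _ (by simp [pv_altGroup_ne])]
      rw [ih (ds.take (ds.length - 3)) (by simp; omega)]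
      rw [pvDotify_large ds (by omega)]
    · rw [pvAltGroup_small ds [] h3, pvDotify_small ds (by omega)]
      simp [PySem.Chars.join, List.intercalate]

theorem pv_join_altGroup (ds : List Char) :
    PySem.Chars.join ['.'] ((pvAltGroup ds []).reverse) = pvDotify ds :=
  pv_join_altGroup_aux ds.length ds (le_refl _)

-- ===== VERDICT (by name: the statement is the Claim_ definition above) =====
theorem pv_digit_ne_comma (c : Char) (h : PySem.Chars.isdigit c = true) : c ≠ ',' := by
  intro he; subst he; exact absurd h (by decide)

theorem formatear_monto_spec : Claim_equal_formatear_monto := by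
  intro valor _
  unfold Spec_formatear_monto
  dsimp only [formatear_monto, formatear_monto_alt]
  rw [pv_fold_filter, pv_digits_clean]
  have hF : ∀ c ∈ valor.toList.filter PySem.Chars.isdigit, PySem.Chars.isdigit c = true := by
    intro c hc; exact (List.mem_filter.mp hc).2
  set F := valor.toList.filter PySem.Chars.isdigit with hFdef
  have hD : ∀ c ∈ (if F = [] then ['0'] else F), PySem.Chars.isdigit c = true := by
    split
    · intro c hc; simp at hc; subst hc; decide
    · exact hF
  rw [pv_intOfDigits_cast _ hD, pv_toChars_nat, pv_roundtrip F hF]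
  set SD := (if F.dropWhile (fun c => c == '0') = [] then ['0'] else F.dropWhile (fun c => c == '0')) with hSDdef
  have hSD : ∀ c ∈ SD, PySem.Chars.isdigit c = true := by
    rw [hSDdef]
    split
    · intro c hc; simp at hc; subst hc; decide
    · intro c hc; exact hF c ((List.dropWhile_sublist _).subset hc)
  rw [pv_replace_single, pv_commify_map SD (fun c hc => pv_digit_ne_comma c (hSD c hc))]
  rw [pv_join_altGroup]
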